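-- pv_equiv track=rewrite | github.com/seifreed/r2inspect | scripts/governance_gates.py | _order_cause_codes
-- ===== SOURCE A (Python) =====
-- COVERAGE_CAUSE_ORDER = (
--     "unmapped_requirement",
--     "multi_phase_mapping",
--     "unknown_mapped_phase",
--     "state_mapping_mismatch",
-- )
--
-- def _order_cause_codes(cause_codes: set[str] | list[str]) -> list[str]:
--     seen = {code.strip() for code in cause_codes if code and code.strip()}
--     ordered: list[str] = []
--     for code in COVERAGE_CAUSE_ORDER:
--         if code in seen:
--             ordered.append(code)
--             seen.remove(code)
--     ordered.extend(sorted(seen))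
--     return ordered
-- ===== SOURCE B (Python) =====
-- COVERAGE_CAUSE_ORDER = (
--     "unmapped_requirement",
--     "multi_phase_mapping",
--     "unknown_mapped_phase",
--     "state_mapping_mismatch",
-- )
--
-- def _order_cause_codes(cause_codes):
--     priority = {code: i for i, code in enumerate(COVERAGE_CAUSE_ORDER)}
--     seen = {code.strip() for code in cause_codes if code and code.strip()}
--     sentinel = len(COVERAGE_CAUSE_ORDER)
--     return sorted(seen, key=lambda c: (priority.get(c, sentinel), c))
-- ===== Notes on version B (the rewrite author's own statement) =====
-- stated objective: idiomatic
-- what changed: Replaces A's two-phase partition (scan the priority tuple removing hits from the set, then extend with sorted leftovers) by one sort of the normalized set under the key (priority-index-or-sentinel, code) built from an enumerate dict.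
import Mathlib
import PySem

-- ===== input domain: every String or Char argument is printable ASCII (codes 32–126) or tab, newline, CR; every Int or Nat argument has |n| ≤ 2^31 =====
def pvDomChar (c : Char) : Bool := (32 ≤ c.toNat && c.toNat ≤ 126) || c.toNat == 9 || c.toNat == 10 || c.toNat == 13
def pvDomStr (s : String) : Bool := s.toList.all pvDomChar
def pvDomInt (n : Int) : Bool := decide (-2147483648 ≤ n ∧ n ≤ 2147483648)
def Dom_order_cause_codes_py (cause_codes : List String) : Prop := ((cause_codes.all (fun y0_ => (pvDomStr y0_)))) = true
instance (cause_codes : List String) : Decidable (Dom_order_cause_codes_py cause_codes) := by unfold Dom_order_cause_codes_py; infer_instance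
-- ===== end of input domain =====

-- B is the same task written the idiomatic way: one sorted() of the normalized set
-- under the key (priority-index-or-sentinel, code) instead of A's partition-then-extend.

-- COVERAGE_CAUSE_ORDER (module constant)
def pvCoverageCauseOrder : List String :=
  ["unmapped_requirement", "multi_phase_mapping", "unknown_mapped_phase", "state_mapping_mismatch"]

-- ===== PORT A =====
def order_cause_codes_py (cause_codes : List String) : List String :=
  -- seen = {code.strip() for code in cause_codes if code and code.strip()}
  let seen : PySem.Set String :=
    PySem.Set.ofList
      ((cause_codes.filter
        (fun code => !(code == "") && !(PySem.Str.strip code == ""))).map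
        (fun code => PySem.Str.strip code))
  -- for code in COVERAGE_CAUSE_ORDER: if code in seen: ordered.append(code); seen.remove(code)
  let st := pvCoverageCauseOrder.foldl
    (fun (st : List String × PySem.Set String) code =>
      if PySem.Set.contains st.2 code then
        -- seen.remove(code): code is in the set in this branch, so remove = discard (no KeyError)
        (st.1 ++ [code], PySem.Set.discard st.2 code)
      else st) ([], seen)
  -- ordered.extend(sorted(seen)); return ordered
  st.1 ++ PySem.List.sorted st.2 (fun x => x)

-- ===== PORT B =====
def order_cause_codes_py_alt (cause_codes : List String) : List String :=
  -- priority = {code: i for i, code in enumerate(COVERAGE_CAUSE_ORDER)}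
  let priority : PySem.Dict String Int :=
    PySem.Dict.ofList ((PySem.List.enumerate pvCoverageCauseOrder).map (fun p => (p.2, p.1)))
  -- seen = {code.strip() for code in cause_codes if code and code.strip()}
  let seen : PySem.Set String :=
    PySem.Set.ofList
      ((cause_codes.filter
        (fun code => !(code == "") && !(PySem.Str.strip code == ""))).map
        (fun code => PySem.Str.strip code))
  -- sentinel = len(COVERAGE_CAUSE_ORDER)
  let sentinel : Int := (pvCoverageCauseOrder.length : Int)
  -- return sorted(seen, key=lambda c: (priority.get(c, sentinel), c))
  PySem.List.sorted2 seen (fun c => priority.getD c sentinel) (fun c => c)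

-- ===== PRECONDITION & SPEC =====
def Spec_order_cause_codes_py (cause_codes : List String) (out : List String) : Prop := out = order_cause_codes_py_alt cause_codes
instance (cause_codes : List String) (out : List String) : Decidable (Spec_order_cause_codes_py cause_codes out) := by unfold Spec_order_cause_codes_py; infer_instance

-- ===== CLAIM (what is proved, stated in full; the proofs are below) =====
def Claim_equal_order_cause_codes_py : Prop := ∀ (cause_codes : List String), Dom_order_cause_codes_py cause_codes → Spec_order_cause_codes_py cause_codes (order_cause_codes_py cause_codes)

-- ===== LEMMAS AND PROOFS =====

-- B's priority dict, as a standalone abbreviation for the proofs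
def pvPriority : PySem.Dict String Int :=
  PySem.Dict.ofList ((PySem.List.enumerate pvCoverageCauseOrder).map (fun p => (p.2, p.1)))

-- B's sort key, as a single lexicographic key
def pvKey (c : String) : Lex (Int × String) := toLex (pvPriority.getD c 4, c)

-- sorted2 over linear-order key components is sorted under the lexicographic key
lemma sorted2_eq_sorted_lex {α : Type} (xs : List α) (k1 : α → Int) (k2 : α → String) :
    PySem.List.sorted2 xs k1 k2 = PySem.List.sorted xs (fun x => toLex (k1 x, k2 x)) := by
  unfold PySem.List.sorted2 PySem.List.sorted
  simp only [if_neg (by simp : ¬(false = true))]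
  congr 1
  funext acc x
  congr 1
  funext a b
  have h : (toLex (k1 a, k2 a) < toLex (k1 b, k2 b)) ↔
      (k1 a < k1 b ∨ (¬ k1 b < k1 a ∧ k2 a < k2 b)) := by
    rw [Prod.Lex.lt_iff]
    show (k1 a < k1 b ∨ k1 a = k1 b ∧ k2 a < k2 b) ↔ _
    rcases lt_trichotomy (k1 a) (k1 b) with h | h | h
    · simp [h]
    · simp [h]
    · have h1 : ¬ k1 a < k1 b := by omega
      have h2 : k1 a ≠ k1 b := by omega
      simp [h, h1, h2]
  rw [decide_eq_decide.mpr h, Bool.decide_or, Bool.decide_and, decide_not]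

-- A's priority loop, characterized: picked priority codes in order + the untouched rest
lemma foldA (P : List String) (hP : P.Nodup) (acc : List String) (S : List String) :
    P.foldl
      (fun (st : List String × PySem.Set String) code =>
        if PySem.Set.contains st.2 code then
          (st.1 ++ [code], PySem.Set.discard st.2 code)
        else st) (acc, S)
    = (acc ++ P.filter (fun c => PySem.Set.contains S c),
       S.filter (fun c => !(P.contains c))) := by
  induction P generalizing acc S with
  | nil => simp
  | cons c P ih =>
    rcases List.nodup_cons.mp hP with ⟨hcP, hPnd⟩
    simp only [List.foldl_cons]
    by_cases hc : PySem.Set.contains S c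
    · rw [if_pos hc, ih hPnd]
      rw [Prod.mk.injEq]
      refine ⟨?_, ?_⟩
      · rw [List.filter_cons_of_pos (by simpa using hc)]
        have hfil : List.filter (fun x => PySem.Set.contains (PySem.Set.discard S c) x) P
            = List.filter (fun x => PySem.Set.contains S x) P := by
          refine List.filter_congr (fun x hx => ?_)
          have hxc : x ≠ c := fun h => hcP (h ▸ hx)
          simp [PySem.Set.contains, PySem.Set.discard, List.mem_filter, hxc]
        rw [hfil, List.append_assoc, List.singleton_append]
      · simp only [PySem.Set.discard, List.filter_filter]
        refine List.filter_congr (fun x _ => ?_)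
        by_cases hxc : x = c
        · subst hxc; simp
        · simp [hxc]
    · rw [if_neg hc, ih hPnd]
      rw [Prod.mk.injEq]
      refine ⟨?_, ?_⟩
      · rw [List.filter_cons_of_neg (by simpa using hc)]
      · refine List.filter_congr (fun x hx => ?_)
        have hxc : x ≠ c := by
          intro h; subst h
          exact hc (by simpa [PySem.Set.contains, List.contains_iff_mem] using hx)
        simp [hxc]

-- the priority dict maps non-priority codes to the sentinel …
lemma pvPriority_getD_not_mem (c : String) (hc : c ∉ pvCoverageCauseOrder) :
    pvPriority.getD c 4 = 4 := by
  simp only [pvCoverageCauseOrder, List.mem_cons, not_or] at hc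
  obtain ⟨h1, h2, h3, h4, -⟩ := hc
  show (PySem.Dict.mk [("unmapped_requirement", 0), ("multi_phase_mapping", 1), ("unknown_mapped_phase", 2), ("state_mapping_mismatch", 3)]).getD c 4 = 4
  simp [PySem.Dict.getD, PySem.Dict.get?, Ne.symm h1, Ne.symm h2, Ne.symm h3, Ne.symm h4]

-- … and priority codes below it
lemma pvPriority_getD_lt_four (c : String) (hc : c ∈ pvCoverageCauseOrder) :
    pvPriority.getD c 4 < 4 := by
  simp only [pvCoverageCauseOrder, List.mem_cons, List.not_mem_nil, or_false] at hc
  rcases hc with h | h | h | h <;> subst h <;> decide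

lemma pvKey_lt_of_idx_lt {a b : String} (h : pvPriority.getD a 4 < pvPriority.getD b 4) :
    pvKey a < pvKey b := Prod.Lex.lt_iff.mpr (Or.inl h)

lemma pvKey_lt_of_idx_eq {a b : String} (h : pvPriority.getD a 4 = pvPriority.getD b 4)
    (h2 : a < b) : pvKey a < pvKey b := Prod.Lex.lt_iff.mpr (Or.inr ⟨h, h2⟩)

lemma pvOrder_pairwise : pvCoverageCauseOrder.Pairwise (fun a b => pvKey a < pvKey b) := by
  have k1 := @pvKey_lt_of_idx_lt "unmapped_requirement" "multi_phase_mapping" (by decide)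
  have k2 := @pvKey_lt_of_idx_lt "unmapped_requirement" "unknown_mapped_phase" (by decide)
  have k3 := @pvKey_lt_of_idx_lt "unmapped_requirement" "state_mapping_mismatch" (by decide)
  have k4 := @pvKey_lt_of_idx_lt "multi_phase_mapping" "unknown_mapped_phase" (by decide)
  have k5 := @pvKey_lt_of_idx_lt "multi_phase_mapping" "state_mapping_mismatch" (by decide)
  have k6 := @pvKey_lt_of_idx_lt "unknown_mapped_phase" "state_mapping_mismatch" (by decide)
  simp only [pvCoverageCauseOrder, List.pairwise_cons, List.mem_cons, List.not_mem_nil, or_false]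
  refine ⟨fun b hb => ?_, fun b hb => ?_, fun b hb => ?_, fun b hb => hb.elim, List.Pairwise.nil⟩
  · rcases hb with h | h | h <;> subst h <;> assumption
  · rcases hb with h | h <;> subst h <;> assumption
  · subst hb; assumption

-- main characterization: on a duplicate-free S, A's assembled output IS sorted(S, pvKey)
lemma main_char (S : List String) (hS : S.Nodup) :
    PySem.List.sorted S pvKey
    = pvCoverageCauseOrder.filter (fun c => PySem.Set.contains S c)
      ++ PySem.List.sorted (S.filter (fun c => !(pvCoverageCauseOrder.contains c))) (fun x => x) := by
  have hPnd : pvCoverageCauseOrder.Nodup := by decide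
  set rest := S.filter (fun c => !(pvCoverageCauseOrder.contains c)) with hrest
  have hrestnd : rest.Nodup := hS.filter _
  have hperm1 : (pvCoverageCauseOrder.filter (fun c => PySem.Set.contains S c)).Perm
      (S.filter (fun c => pvCoverageCauseOrder.contains c)) := by
    refine (List.perm_ext_iff_of_nodup (hPnd.filter _) (hS.filter _)).mpr (fun a => ?_)
    simp [PySem.Set.contains, List.mem_filter, and_comm]
  have hperm : (pvCoverageCauseOrder.filter (fun c => PySem.Set.contains S c)
      ++ PySem.List.sorted rest (fun x => x)).Perm S :=
    ((List.Perm.append_left _ (PySem.List.sorted_perm _ _ _)).trans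
      (hperm1.append_right rest)).trans (List.filter_append_perm _ S)
  have hmemrest : ∀ c ∈ PySem.List.sorted rest (fun x => x), pvPriority.getD c 4 = 4 := by
    intro c hc
    have hm : c ∈ rest := ((PySem.List.sorted_perm _ _ _).mem_iff).mp hc
    rw [hrest, List.mem_filter] at hm
    refine pvPriority_getD_not_mem c ?_
    simpa [List.contains_iff_mem] using hm.2
  have hpw : (pvCoverageCauseOrder.filter (fun c => PySem.Set.contains S c)
      ++ PySem.List.sorted rest (fun x => x)).Pairwise (fun a b => pvKey a < pvKey b) := by
    rw [List.pairwise_append]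
    refine ⟨List.Pairwise.sublist List.filter_sublist pvOrder_pairwise, ?_, ?_⟩
    · have hle : (PySem.List.sorted rest (fun x => x)).Pairwise (fun a b => a ≤ b) :=
        PySem.List.sorted_pairwise _ _
      have hnd : (PySem.List.sorted rest (fun x => x)).Nodup :=
        ((PySem.List.sorted_perm _ _ _).nodup_iff).mpr hrestnd
      have hlt : (PySem.List.sorted rest (fun x => x)).Pairwise (fun a b => a < b) :=
        (hle.and hnd).imp (fun h => lt_of_le_of_ne h.1 h.2)
      refine hlt.imp_of_mem (fun {a b} ha hb hab => ?_)
      exact pvKey_lt_of_idx_eq (by rw [hmemrest a ha, hmemrest b hb]) hab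
    · intro a ha b hb
      refine pvKey_lt_of_idx_lt ?_
      rw [hmemrest b hb]
      exact pvPriority_getD_lt_four a (List.mem_of_mem_filter ha)
  exact PySem.List.sorted_eq_of_perm_of_pairwise_lt _ _ _ hperm hpw

-- ===== VERDICT (by name: the statement is the Claim_ definition above) =====
theorem order_cause_codes_py_spec : Claim_equal_order_cause_codes_py := by
  intro cause_codes _
  unfold Spec_order_cause_codes_py order_cause_codes_py order_cause_codes_py_alt
  rw [sorted2_eq_sorted_lex]
  set seen : PySem.Set String :=
    PySem.Set.ofList
      ((cause_codes.filter
        (fun code => !(code == "") && !(PySem.Str.strip code == ""))).map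
        (fun code => PySem.Str.strip code)) with hseen
  have hnd : seen.Nodup := PySem.Set.nodup_ofList _
  simp only [foldA pvCoverageCauseOrder (by decide), List.nil_append]
  exact (main_char seen hnd).symm
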